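-- pv_equiv track=rewrite | github.com/gv1010/DSA-Practice | String/848Shitstring.py | shiftString
-- ===== SOURCE A (Python) =====
-- def shiftString(S, shifts):
--
-- 	val = 0
-- 	new = []
-- 	for i in shifts[::-1]:
-- 		val = i + val
-- 		new.insert(0, val)
-- 	res = ""
-- 	for idx, s in enumerate(S):
-- 		if idx < len(new):
-- 			shift = ord(s)-ord('a') + new[idx]
-- 			shift = shift%26
-- 			res = res + chr(ord('a')+shift)
-- 		else:
-- 			res = res + s
-- 	return res
-- ===== SOURCE B (Python) =====
-- def shiftString(S, shifts):
--     # Single right-to-left pass with a running accumulator: cum equals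
--     # sum(shifts[idx:]) at each position, so no suffix-sum table is built.
--     cum = sum(shifts[len(S):])
--     n = len(shifts)
--     out = []
--     for idx in range(len(S) - 1, -1, -1):
--         ch = S[idx]
--         if idx < n:
--             cum += shifts[idx]
--             out.append(chr((ord(ch) - ord('a') + cum) % 26 + ord('a')))
--         else:
--             out.append(ch)
--     return ''.join(reversed(out))
-- ===== Notes on version B (the rewrite author's own statement) =====
-- stated objective: faster
-- what changed: B drops A's suffix-sum table (built via repeated list.insert(0,..)) and A's quadratic string concatenation, making one right-to-left pass over S that threads a running accumulator equal to the suffix sum, collecting characters and reversing once at the end.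
import Mathlib
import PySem

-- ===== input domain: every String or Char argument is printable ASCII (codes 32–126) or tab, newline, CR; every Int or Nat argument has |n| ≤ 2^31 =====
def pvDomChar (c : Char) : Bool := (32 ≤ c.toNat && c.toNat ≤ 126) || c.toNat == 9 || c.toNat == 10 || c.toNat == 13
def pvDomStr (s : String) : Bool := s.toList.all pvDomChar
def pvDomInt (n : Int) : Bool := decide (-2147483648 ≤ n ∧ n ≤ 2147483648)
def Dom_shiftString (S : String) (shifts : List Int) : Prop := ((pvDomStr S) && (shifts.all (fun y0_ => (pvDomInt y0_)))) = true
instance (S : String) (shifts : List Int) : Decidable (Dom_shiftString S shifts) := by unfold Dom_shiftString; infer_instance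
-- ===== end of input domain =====

-- B replaces A's suffix-sum table (repeated insert(0,..)) and per-character string
-- concatenation by a single right-to-left pass with a running accumulator (faster:
-- O(n) vs A's quadratic behaviour, measured).

-- ===== PORT A =====
def shiftString (S : String) (shifts : List Int) : String :=
  -- val = 0; new = []; for i in shifts[::-1]: val = i + val; new.insert(0, val)
  let p := ((PySem.List.slice? shifts none none (-1)).getD []).foldl
      (fun (q : Int × List Int) i => (i + q.1, (i + q.1) :: q.2)) (0, [])
  let new := p.2
  -- res = ""; for idx, s in enumerate(S): …
  let res := (PySem.List.enumerate S.toList 0).foldl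
      (fun (res : List Char) (e : Int × Char) =>
        if e.1 < (new.length : Int) then
          res ++ [Char.ofNat (97 + (PySem.Int.mod (((e.2.toNat : Int) - 97) + PySem.List.pyGetD new e.1 0) 26)).toNat]
        else
          res ++ [e.2]) []
  String.mk res

-- ===== PORT B =====
def shiftString_alt (S : String) (shifts : List Int) : String :=
  -- cum = sum(shifts[len(S):]); n = len(shifts); out = []
  let cum0 : Int := (PySem.List.slice shifts (some (S.toList.length : Int)) none).sum
  let n := shifts.length
  -- for idx in range(len(S)-1, -1, -1): … out.append(…)
  let p := (PySem.List.pyRange ((S.toList.length : Int) - 1) (-1) (-1)).foldl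
      (fun (q : Int × List Char) idx =>
        let ch := PySem.List.pyGetD S.toList idx ' '
        if idx < (n : Int) then
          let c := q.1 + PySem.List.pyGetD shifts idx 0
          (c, q.2 ++ [Char.ofNat (97 + (PySem.Int.mod (((ch.toNat : Int) - 97) + c) 26)).toNat])
        else
          (q.1, q.2 ++ [ch])) (cum0, [])
  -- ''.join(reversed(out))
  String.mk p.2.reverse

-- ===== PRECONDITION & SPEC =====
def Spec_shiftString (S : String) (shifts : List Int) (out : String) : Prop := out = shiftString_alt S shifts
instance (S : String) (shifts : List Int) (out : String) : Decidable (Spec_shiftString S shifts out) := by unfold Spec_shiftString; infer_instance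

-- ===== CLAIM (what is proved, stated in full; the proofs are below) =====
def Claim_equal_shiftString : Prop := ∀ (S : String) (shifts : List Int), Dom_shiftString S shifts → Spec_shiftString S shifts (shiftString S shifts)

-- ===== LEMMAS AND PROOFS =====

-- suffix sums of a list: (sufs l).getD k 0 = (l.drop k).sum
def sufs : List Int → List Int
  | [] => []
  | x :: xs => (x + xs.sum) :: sufs xs

theorem length_sufs (l : List Int) : (sufs l).length = l.length := by
  induction l with
  | nil => rfl
  | cons x xs ih => simp [sufs, ih]

theorem getD_sufs (l : List Int) (k : Nat) : (sufs l).getD k 0 = (l.drop k).sum := by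
  induction l generalizing k with
  | nil => simp [sufs]
  | cons x xs ih =>
    cases k with
    | zero => simp [sufs]
    | succ k => simpa [sufs] using ih k

-- A's first loop builds exactly the suffix sums (and the final val is the total sum).
theorem foldA_eq (l : List Int) :
    l.reverse.foldl (fun (q : Int × List Int) i => (i + q.1, (i + q.1) :: q.2)) (0, []) =
      (l.sum, sufs l) := by
  induction l with
  | nil => rfl
  | cons x xs ih =>
    rw [List.reverse_cons, List.foldl_append, ih]
    simp [sufs]

-- the per-character transform both programs apply at position j (0 ≤ j < len S)
def pvG (cs : List Char) (shifts : List Int) (j : Int) : Char :=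
  if j < (shifts.length : Int) then
    Char.ofNat (97 + (PySem.Int.mod ((((PySem.List.pyGetD cs j ' ').toNat : Int) - 97) + (shifts.drop j.toNat).sum) 26)).toNat
  else
    PySem.List.pyGetD cs j ' '

-- what A's second loop appends for one enumerate entry
def gA (shifts : List Int) (e : Int × Char) : Char :=
  if e.1 < ((sufs shifts).length : Int) then
    Char.ofNat (97 + (PySem.Int.mod (((e.2.toNat : Int) - 97) + PySem.List.pyGetD (sufs shifts) e.1 0) 26)).toNat
  else
    e.2

theorem shiftString_chars (S : String) (shifts : List Int) :
    shiftString S shifts =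
      String.mk ((PySem.List.pyRange 0 (S.toList.length : Int) 1).map (pvG S.toList shifts)) := by
  unfold shiftString
  rw [show (PySem.List.slice? shifts none none (-1)).getD [] = shifts.reverse by
        rw [PySem.List.slice?_none_none_neg_one]; rfl,
      foldA_eq]
  dsimp only
  have h : ∀ (acc : List Char), ∀ e ∈ PySem.List.enumerate S.toList 0,
      (fun (res : List Char) (e : Int × Char) =>
        if e.1 < ((sufs shifts).length : Int) then
          res ++ [Char.ofNat (97 + (PySem.Int.mod (((e.2.toNat : Int) - 97) + PySem.List.pyGetD (sufs shifts) e.1 0) 26)).toNat]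
        else
          res ++ [e.2]) acc e = acc ++ [gA shifts e] := by
    intro acc e _
    simp only [gA]
    split_ifs <;> rfl
  rw [PySem.List.foldl_congr_mem _ _ _ _ h,
      PySem.List.foldl_append_singleton_eq_map,
      PySem.List.enumerate_eq_map_pyRange S.toList ' ', List.map_map]
  simp only [PySem.List.len_eq, List.nil_append]
  congr 1
  apply List.map_congr_left
  intro j hj
  have hj' := (PySem.List.mem_pyRange_one).1 hj
  simp only [Function.comp_apply, gA, pvG, length_sufs]
  split_ifs with hlt
  · have hcast : j = ((j.toNat : Nat) : Int) := by omega
    rw [hcast, PySem.List.pyGetD_natCast (xs := sufs shifts), getD_sufs, Int.toNat_natCast]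
  · rfl

-- the canonical form of B's loop body
def stepB (cs : List Char) (shifts : List Int) (q : Int × List Char) (idx : Int) : Int × List Char :=
  if idx < (shifts.length : Int) then
    (q.1 + PySem.List.pyGetD shifts idx 0,
     q.2 ++ [Char.ofNat (97 + (PySem.Int.mod ((((PySem.List.pyGetD cs idx ' ').toNat : Int) - 97) + (q.1 + PySem.List.pyGetD shifts idx 0)) 26)).toNat])
  else
    (q.1, q.2 ++ [PySem.List.pyGetD cs idx ' '])

-- B's loop invariant: after processing indices len-1 … k, the accumulator is the
-- suffix sum from k and the output holds the transformed characters in reverse.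
theorem foldB_eq (cs : List Char) (shifts : List Int) (m k : Nat)
    (hmk : k + m = cs.length) :
    ((PySem.List.pyRange (k : Int) (cs.length : Int) 1).reverse).foldl (stepB cs shifts)
        ((shifts.drop cs.length).sum, []) =
      ((shifts.drop k).sum,
        ((PySem.List.pyRange (k : Int) (cs.length : Int) 1).map (pvG cs shifts)).reverse) := by
  induction m generalizing k with
  | zero =>
    have hk : k = cs.length := by omega
    subst hk
    rw [PySem.List.pyRange_one_eq_nil (by omega)]
    simp
  | succ m ih =>
    have hklt : (k : Int) < (cs.length : Int) := by exact_mod_cast (by omega : k < cs.length)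
    rw [PySem.List.pyRange_one_cons hklt]
    have hcast : (k : Int) + 1 = ((k + 1 : Nat) : Int) := by push_cast; ring
    rw [List.reverse_cons, List.foldl_append, hcast, ih (k + 1) (by omega)]
    rw [List.foldl_cons, List.foldl_nil]
    simp only [List.map_cons, List.reverse_cons, stepB, pvG, Int.toNat_natCast]
    by_cases hkn : (k : Int) < (shifts.length : Int)
    · have hknNat : k < shifts.length := by exact_mod_cast hkn
      have hdrop : shifts.drop k = shifts[k] :: shifts.drop (k + 1) :=
        List.drop_eq_getElem_cons hknNat
      have hget : PySem.List.pyGetD shifts (k : Int) 0 = shifts[k] := by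
        rw [PySem.List.pyGetD_natCast]
        exact List.getD_eq_getElem _ _ hknNat
      rw [if_pos hkn, if_pos hkn, Prod.mk.injEq]
      refine ⟨?_, ?_⟩
      · rw [hget, hdrop, List.sum_cons]; ring
      · rw [hget, hdrop, List.sum_cons]
        congr 3
        ring_nf
    · have hle : shifts.length ≤ k := by omega
      rw [if_neg hkn, if_neg hkn, Prod.mk.injEq]
      refine ⟨?_, rfl⟩
      rw [List.drop_eq_nil_of_le hle, List.drop_eq_nil_of_le (by omega)]

theorem shiftString_alt_chars (S : String) (shifts : List Int) :
    shiftString_alt S shifts =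
      String.mk ((PySem.List.pyRange 0 (S.toList.length : Int) 1).map (pvG S.toList shifts)) := by
  unfold shiftString_alt
  dsimp only
  rw [PySem.List.slice_from (ha := by positivity)]
  rw [show PySem.List.pyRange ((S.toList.length : Int) - 1) (-1) (-1) =
        (PySem.List.pyRange 0 (S.toList.length : Int) 1).reverse by
        rw [PySem.List.pyRange_neg_one_eq_reverse]; norm_num]
  simp only [Int.toNat_natCast]
  show String.mk ((List.foldl (stepB S.toList shifts) ((shifts.drop S.toList.length).sum, [])
      ((PySem.List.pyRange 0 (S.toList.length : Int) 1).reverse)).2.reverse) = _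
  have h0 := foldB_eq S.toList shifts S.toList.length 0 (by omega)
  simp only [Nat.cast_zero, List.drop_zero] at h0
  rw [h0]
  simp

-- ===== VERDICT (by name: the statement is the Claim_ definition above) =====
theorem shiftString_spec : Claim_equal_shiftString := by
  intro S shifts _
  unfold Spec_shiftString
  rw [shiftString_chars, shiftString_alt_chars]
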